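-- pv_equiv track=rewrite | github.com/taylorparsons/PrepTalk | app/services/store.py | _build_live_memory
-- ===== SOURCE A (Python) =====
-- def _label_role(role: str) -> str:
--     if role == "coach":
--         return "Coach"
--     if role == "candidate":
--         return "Candidate"
--     if not role:
--         return "Unknown"
--     return role.capitalize()
--
-- def _truncate_text(value: str, limit: int) -> str:
--     if not value:
--         return ""
--     cleaned = value.strip()
--     if len(cleaned) <= limit:
--         return cleaned
--     return f"{cleaned[:limit].rstrip()}..."
--
-- def _last_role_text(transcript: list[dict], role: str) -> str:
--     for entry in reversed(transcript or []):
--         if entry.get("role") == role and entry.get("text"):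
--             return str(entry.get("text") or "").strip()
--     return ""
--
-- def _build_live_memory(
--     transcript: list[dict],
--     max_entries: int | None = None,
--     max_chars: int | None = None
-- ) -> str:
--     if not transcript:
--         return ""
--     header_lines: list[str] = []
--     last_coach = _truncate_text(_last_role_text(transcript, "coach"), 240)
--     last_candidate = _truncate_text(_last_role_text(transcript, "candidate"), 240)
--     if last_coach:
--         header_lines.append(f"Last coach prompt: {last_coach}")
--     if last_candidate:
--         header_lines.append(f"Last candidate response: {last_candidate}")
--     entries = transcript if max_entries is None else transcript[-max_entries:]
--     lines: list[str] = []
--     for entry in entries: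
--         text_value = str(entry.get("text") or "").strip()
--         if not text_value:
--             continue
--         role = _label_role(str(entry.get("role") or "system"))
--         lines.append(f"{role}: {text_value}")
--     memory = "\n".join(lines)
--     if header_lines:
--         memory = f"{chr(10).join(header_lines)}\n\nTranscript:\n{memory}"
--     if max_chars is not None and len(memory) > max_chars:
--         memory = memory[-max_chars:]
--         newline = memory.find("\n")
--         if newline != -1:
--             memory = memory[newline + 1:].lstrip()
--     return memory
-- ===== SOURCE B (Python) =====
-- _LABELS = {"coach": "Coach", "candidate": "Candidate"}
--
--
-- def _clip(value: str) -> str: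
--     cleaned = value.strip()
--     if len(cleaned) <= 240:
--         return cleaned
--     return cleaned[:240].rstrip() + "..."
--
--
-- def _format_line(entry: dict):
--     text = str(entry.get("text") or "").strip()
--     if not text:
--         return None
--     role = str(entry.get("role") or "system")
--     return _LABELS.get(role, role.capitalize()) + ": " + text
--
--
-- def _build_live_memory(
--     transcript: list[dict],
--     max_entries: int | None = None,
--     max_chars: int | None = None
-- ) -> str:
--     if not transcript:
--         return ""
--     # one forward pass: remember the last truthy text per interesting role
--     last_coach = ""
--     last_candidate = ""
--     for entry in transcript:
--         text = entry.get("text")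
--         if not text:
--             continue
--         role = entry.get("role")
--         if role == "coach":
--             last_coach = str(text).strip()
--         elif role == "candidate":
--             last_candidate = str(text).strip()
--     header_lines = []
--     coach = _clip(last_coach)
--     candidate = _clip(last_candidate)
--     if coach:
--         header_lines.append("Last coach prompt: " + coach)
--     if candidate:
--         header_lines.append("Last candidate response: " + candidate)
--     entries = transcript if max_entries is None else transcript[-max_entries:]
--     lines = [s for s in map(_format_line, entries) if s is not None]
--     memory = "\n".join(lines)
--     if header_lines:
--         memory = "\n".join(header_lines) + "\n\nTranscript:\n" + memory
--     if max_chars is not None and len(memory) > max_chars: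
--         memory = memory[-max_chars:]
--         newline = memory.find("\n")
--         if newline != -1:
--             memory = memory[newline + 1:].lstrip()
--     return memory
-- ===== Notes on version B (the rewrite author's own statement) =====
-- stated objective: alternative
-- what changed: B replaces A's two reverse _last_role_text scans with one forward pass keeping the last truthy text per role in two accumulators, and builds the transcript lines by a filter-map with a role-label table instead of A's accumulator loop over an if-chain.
import Mathlib
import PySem

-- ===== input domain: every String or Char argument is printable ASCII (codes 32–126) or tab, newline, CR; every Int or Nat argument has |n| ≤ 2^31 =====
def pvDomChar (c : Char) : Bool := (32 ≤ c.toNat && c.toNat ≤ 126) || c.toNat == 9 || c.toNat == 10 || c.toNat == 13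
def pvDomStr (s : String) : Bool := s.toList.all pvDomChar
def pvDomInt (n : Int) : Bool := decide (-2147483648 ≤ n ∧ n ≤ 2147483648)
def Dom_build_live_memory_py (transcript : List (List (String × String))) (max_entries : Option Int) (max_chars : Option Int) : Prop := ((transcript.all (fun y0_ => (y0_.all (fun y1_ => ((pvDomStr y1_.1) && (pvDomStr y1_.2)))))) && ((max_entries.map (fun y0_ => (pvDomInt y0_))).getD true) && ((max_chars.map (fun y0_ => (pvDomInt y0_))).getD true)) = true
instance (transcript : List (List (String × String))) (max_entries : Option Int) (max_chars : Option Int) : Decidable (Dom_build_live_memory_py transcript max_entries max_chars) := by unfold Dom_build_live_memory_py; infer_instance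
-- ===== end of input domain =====

-- B merges A's two reverse `_last_role_text` scans into one forward pass keeping the last
-- truthy text per role, and builds the transcript lines by filter-map with a label table
-- instead of A's accumulator loop with an if-chain; return value proved equal everywhere.

-- ===== PORT A =====
-- entry.get(k) on a dict ported as first-match lookup in the association list
def dget (e : List (String × String)) (k : String) : Option String :=
  (e.find? (fun p => p.1 == k)).map (·.2)

-- role.capitalize() (exact on ASCII: first char uppercased, rest lowercased)
def pyCapitalize (s : String) : String :=
  match s.toList with
  | [] => ""
  | c :: cs => String.ofList (PySem.Chars.upperChar c :: PySem.Chars.lower cs)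

def labelRole (role : String) : String :=
  if role == "coach" then "Coach"
  else if role == "candidate" then "Candidate"
  else if role == "" then "Unknown"
  else pyCapitalize role

def truncateText (value : String) (limit : Int) : String :=
  if value == "" then ""
  else
    let cleaned := PySem.Str.strip value
    if (PySem.Str.len cleaned : Int) ≤ limit then cleaned
    else PySem.Str.rstrip (PySem.Str.slice cleaned none (some limit)) ++ "..."

-- Python's 'str(entry.get("role") or "system")'
def roleOr (e : List (String × String)) : String :=
  let r := (dget e "role").getD ""
  if r == "" then "system" else r

-- _last_role_text's loop over reversed(transcript)
def lastRoleTextGo (role : String) : List (List (String × String)) → String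
  | [] => ""
  | e :: rest =>
    if (dget e "role" == some role) && ((dget e "text").getD "" != "") then
      PySem.Str.strip ((dget e "text").getD "")
    else lastRoleTextGo role rest

def lastRoleText (transcript : List (List (String × String))) (role : String) : String :=
  lastRoleTextGo role transcript.reverse

-- the transcript-lines loop of A
def linesA (entries : List (List (String × String))) : List String :=
  entries.foldl (fun acc e =>
    let text_value := PySem.Str.strip ((dget e "text").getD "")
    if text_value == "" then acc
    else acc ++ [labelRole (roleOr e) ++ ": " ++ text_value]) []

-- the shared tail trim (identical in both Pythons)
def tailTrim (memory : String) (max_chars : Option Int) : String :=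
  match max_chars with
  | none => memory
  | some mc =>
    if mc < (PySem.Str.len memory : Int) then
      let m := PySem.Str.slice memory (some (-mc)) none
      let nl := PySem.Str.find m "\n"
      if nl != -1 then PySem.Str.lstrip (PySem.Str.slice m (some (nl + 1)) none) else m
    else memory

def build_live_memory_py (transcript : List (List (String × String))) (max_entries : Option Int) (max_chars : Option Int) : String :=
  if transcript = [] then ""
  else
    let last_coach := truncateText (lastRoleText transcript "coach") 240
    let last_candidate := truncateText (lastRoleText transcript "candidate") 240
    let header_lines : List String :=
      (if last_coach == "" then [] else ["Last coach prompt: " ++ last_coach]) ++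
      (if last_candidate == "" then [] else ["Last candidate response: " ++ last_candidate])
    let entries := match max_entries with
      | none => transcript
      | some m => PySem.List.slice transcript (some (-m)) none
    let memory := PySem.Str.join "\n" (linesA entries)
    let memory := if header_lines == [] then memory
      else PySem.Str.join "\n" header_lines ++ "\n\nTranscript:\n" ++ memory
    tailTrim memory max_chars

-- ===== PORT B =====
def labelsDict : PySem.Dict String String :=
  PySem.Dict.mk [("coach", "Coach"), ("candidate", "Candidate")]

-- _clip
def clip (value : String) : String :=
  let cleaned := PySem.Str.strip value
  if (PySem.Str.len cleaned : Int) ≤ 240 then cleaned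
  else PySem.Str.rstrip (PySem.Str.slice cleaned none (some 240)) ++ "..."

-- _format_line
def formatLine (e : List (String × String)) : Option String :=
  let text := PySem.Str.strip ((dget e "text").getD "")
  if text == "" then none
  else some ((labelsDict.get? (roleOr e)).getD (pyCapitalize (roleOr e)) ++ ": " ++ text)

-- the single forward pass keeping the last truthy text per role
def lastPassStep (acc : String × String) (e : List (String × String)) : String × String :=
  match dget e "text" with
  | none => acc
  | some t =>
    if t == "" then acc
    else match dget e "role" with
      | some "coach" => (PySem.Str.strip t, acc.2)
      | some "candidate" => (acc.1, PySem.Str.strip t)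
      | _ => acc

def build_live_memory_py_alt (transcript : List (List (String × String))) (max_entries : Option Int) (max_chars : Option Int) : String :=
  if transcript = [] then ""
  else
    let last := transcript.foldl lastPassStep ("", "")
    let coach := clip last.1
    let candidate := clip last.2
    let header_lines : List String :=
      (if coach == "" then [] else ["Last coach prompt: " ++ coach]) ++
      (if candidate == "" then [] else ["Last candidate response: " ++ candidate])
    let entries := match max_entries with
      | none => transcript
      | some m => PySem.List.slice transcript (some (-m)) none
    let memory := PySem.Str.join "\n" (entries.filterMap formatLine)
    let memory := if header_lines == [] then memory
      else PySem.Str.join "\n" header_lines ++ "\n\nTranscript:\n" ++ memory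
    tailTrim memory max_chars

-- ===== PRECONDITION & SPEC =====
def Spec_build_live_memory_py (transcript : List (List (String × String))) (max_entries : Option Int) (max_chars : Option Int) (out : String) : Prop := out = build_live_memory_py_alt transcript max_entries max_chars
instance (transcript : List (List (String × String))) (max_entries : Option Int) (max_chars : Option Int) (out : String) : Decidable (Spec_build_live_memory_py transcript max_entries max_chars out) := by unfold Spec_build_live_memory_py; infer_instance

-- ===== CLAIM (what is proved, stated in full; the proofs are below) =====
def Claim_equal_build_live_memory_py : Prop := ∀ (transcript : List (List (String × String))) (max_entries : Option Int) (max_chars : Option Int), Dom_build_live_memory_py transcript max_entries max_chars → Spec_build_live_memory_py transcript max_entries max_chars (build_live_memory_py transcript max_entries max_chars)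

-- ===== LEMMAS AND PROOFS =====

-- the common match predicate and value of a "last role text" search
def pRole (role : String) (e : List (String × String)) : Bool :=
  (dget e "role" == some role) && ((dget e "text").getD "" != "")

def vText (e : List (String × String)) : String :=
  PySem.Str.strip ((dget e "text").getD "")

theorem lastRoleTextGo_eq (role : String) (l : List (List (String × String))) :
    lastRoleTextGo role l = (((l.find? (pRole role)).map vText).getD "") := by
  induction l with
  | nil => rfl
  | cons e rest ih =>
    by_cases h : pRole role e
    · rw [List.find?_cons_of_pos h]
      simp only [lastRoleTextGo]
      rw [if_pos (by simpa [pRole] using h)]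
      simp [vText]
    · rw [List.find?_cons_of_neg (by simpa using h)]
      simp only [lastRoleTextGo]
      rw [if_neg (by simpa [pRole] using h)]
      exact ih

theorem lastPass_eq (l : List (List (String × String))) (a b : String) :
    l.foldl lastPassStep (a, b) =
      ((((l.reverse.find? (pRole "coach")).map vText).getD a),
       (((l.reverse.find? (pRole "candidate")).map vText).getD b)) := by
  induction l generalizing a b with
  | nil => rfl
  | cons e rest ih =>
    simp only [List.foldl_cons, List.reverse_cons, List.find?_append]
    rw [ih]
    have step : ∀ r : String, ([e].find? (pRole r)) = if pRole r e then some e else none := by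
      intro r
      by_cases h : pRole r e
      · rw [List.find?_cons_of_pos h, if_pos h]
      · rw [List.find?_cons_of_neg (by simpa using h), if_neg h]
        rfl
    have stepv : ∀ r d : String, ((Option.or (rest.reverse.find? (pRole r)) ([e].find? (pRole r))).map vText).getD d
        = ((rest.reverse.find? (pRole r)).map vText).getD (((([e].find? (pRole r))).map vText).getD d) := by
      intro r d
      cases rest.reverse.find? (pRole r) <;> simp
    rw [stepv, stepv]
    congr 1
    · congr 1
      rw [step]
      unfold lastPassStep
      cases ht : dget e "text" with
      | none => simp [pRole, ht]
      | some t =>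
        by_cases h0 : t = ""
        · simp [pRole, ht, h0]
        · cases hr : dget e "role" with
          | none => simp [pRole, ht, hr, h0]
          | some r =>
            by_cases h1 : r = "coach" <;> by_cases h2 : r = "candidate" <;>
              simp_all [pRole, vText]
    · congr 1
      rw [step]
      unfold lastPassStep
      cases ht : dget e "text" with
      | none => simp [pRole, ht]
      | some t =>
        by_cases h0 : t = ""
        · simp [pRole, ht, h0]
        · cases hr : dget e "role" with
          | none => simp [pRole, ht, hr, h0]
          | some r =>
            by_cases h1 : r = "coach" <;> by_cases h2 : r = "candidate" <;>
              simp_all [pRole, vText]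

theorem truncate_eq_clip (v : String) : truncateText v 240 = clip v := by
  unfold truncateText clip
  by_cases h : v = ""
  · subst h
    simp [PySem.Str.strip, PySem.Chars.strip, PySem.Chars.lstrip, PySem.Chars.rstrip, PySem.Str.len]
  · simp [h]

theorem label_eq (e : List (String × String)) :
    labelRole (roleOr e) = (labelsDict.get? (roleOr e)).getD (pyCapitalize (roleOr e)) := by
  have hne : roleOr e ≠ "" := by
    unfold roleOr
    by_cases h : ((dget e "role").getD "") = "" <;> simp [h]
  unfold labelRole labelsDict
  by_cases h1 : roleOr e = "coach"
  · simp [h1, PySem.Dict.get?]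
  · by_cases h2 : roleOr e = "candidate"
    · simp [h2, PySem.Dict.get?]
    · simp [h1, h2, hne, PySem.Dict.get?, Ne.symm h1, Ne.symm h2]

theorem linesA_eq (entries : List (List (String × String))) :
    linesA entries = entries.filterMap formatLine := by
  unfold linesA
  suffices h : ∀ acc, entries.foldl (fun acc e =>
      let text_value := PySem.Str.strip ((dget e "text").getD "")
      if text_value == "" then acc
      else acc ++ [labelRole (roleOr e) ++ ": " ++ text_value]) acc
      = acc ++ entries.filterMap formatLine by
    simpa using h []
  induction entries with
  | nil => intro acc; simp
  | cons e rest ih =>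
    intro acc
    simp only [List.foldl_cons, List.filterMap_cons]
    by_cases h : PySem.Str.strip ((dget e "text").getD "") = ""
    · rw [ih]
      simp [h, formatLine]
    · rw [ih]
      simp [h, formatLine, label_eq e, List.append_assoc]

theorem build_live_memory_py_spec' (transcript : List (List (String × String)))
    (max_entries : Option Int) (max_chars : Option Int) :
    build_live_memory_py transcript max_entries max_chars
      = build_live_memory_py_alt transcript max_entries max_chars := by
  unfold build_live_memory_py build_live_memory_py_alt
  by_cases h : transcript = []
  · simp [h]
  · simp only [h, lastPass_eq, linesA_eq, lastRoleText, lastRoleTextGo_eq,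
      truncate_eq_clip]


-- ===== VERDICT (by name: the statement is the Claim_ definition above) =====
theorem build_live_memory_py_spec : Claim_equal_build_live_memory_py := by
  intro t me mc _
  exact build_live_memory_py_spec' t me mc
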